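-- pv_equiv track=rewrite | github.com/unhuman/JiraTools | codeAudit.py | extract_capture_groups
-- ===== SOURCE A (Python) =====
-- def extract_capture_groups(regex_str):
--     """Extract the text of each capture group from a regex string.
--
--     Parses the regex string to find top-level capturing groups (skipping
--     non-capturing (?:...) groups) and returns the raw text of each.
--
--     Args:
--         regex_str: Original regex string
--
--     Returns:
--         List of group text strings, e.g. ['.*?', '.+'] for '(.*?)foo(.+)'
--     """
--     groups = []
--     depth = 0
--     group_start = None
--     capture_depth = None
--
--     i = 0
--     while i < len(regex_str):
--         ch = regex_str[i]
--
--         # Skip escaped characters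
--         if ch == '\\':
--             i += 2
--             continue
--
--         # Skip character classes [...]
--         if ch == '[':
--             i += 1
--             while i < len(regex_str) and regex_str[i] != ']':
--                 if regex_str[i] == '\\':
--                     i += 1
--                 i += 1
--             i += 1
--             continue
--
--         if ch == '(':
--             if i + 1 < len(regex_str) and regex_str[i + 1] == '?':
--                 # Non-capturing group
--                 depth += 1
--             else:
--                 # Capturing group
--                 depth += 1
--                 if capture_depth is None:
--                     group_start = i
--                     capture_depth = depth
--             i += 1
--             continue
--
--         if ch == ')':
--             if capture_depth is not None and depth == capture_depth:
--                 # End of a top-level capture group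
--                 groups.append(regex_str[group_start:i + 1])
--                 group_start = None
--                 capture_depth = None
--             depth -= 1
--             i += 1
--             continue
--
--         i += 1
--
--     return groups
-- ===== SOURCE B (Python) =====
-- def _events(regex_str):
--     """Single lexical pass: emit ('(', index, raw_capturing) and (')', index, False)
--     for parens outside escapes and character classes."""
--     events = []
--     i = 0
--     n = len(regex_str)
--     while i < n:
--         ch = regex_str[i]
--         if ch == '\\':
--             i += 2
--             continue
--         if ch == '[':
--             i += 1
--             while i < n and regex_str[i] != ']':
--                 if regex_str[i] == '\\':
--                     i += 1
--                 i += 1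
--             i += 1
--             continue
--         if ch == '(':
--             capturing = not (i + 1 < n and regex_str[i + 1] == '?')
--             events.append(('(', i, capturing))
--         elif ch == ')':
--             events.append((')', i, False))
--         i += 1
--     return events
--
--
-- def extract_capture_groups(regex_str):
--     groups = []
--     stack = []          # open groups: (start index, is_the_pending_top_level_capture)
--     pending = False     # some entry on the stack is the pending capture group
--     for kind, idx, capturing in _events(regex_str):
--         if kind == '(':
--             is_cap = capturing and not pending
--             stack.append((idx, is_cap))
--             if is_cap:
--                 pending = True
--         else:
--             if stack:
--                 start, was_cap = stack.pop()
--                 if was_cap: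
--                     groups.append(regex_str[start:idx + 1])
--                     pending = False
--     return groups
-- ===== Notes on version B (the rewrite author's own statement) =====
-- stated objective: alternative
-- what changed: Replaces A's single while-loop with depth/capture_depth integer-counter bookkeeping by a two-phase design: a lexical pass emitting paren events (position + raw-capturing flag), then a fold over the events maintaining an explicit stack of open groups whose popped capturing entry yields the group text.
import Mathlib
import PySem

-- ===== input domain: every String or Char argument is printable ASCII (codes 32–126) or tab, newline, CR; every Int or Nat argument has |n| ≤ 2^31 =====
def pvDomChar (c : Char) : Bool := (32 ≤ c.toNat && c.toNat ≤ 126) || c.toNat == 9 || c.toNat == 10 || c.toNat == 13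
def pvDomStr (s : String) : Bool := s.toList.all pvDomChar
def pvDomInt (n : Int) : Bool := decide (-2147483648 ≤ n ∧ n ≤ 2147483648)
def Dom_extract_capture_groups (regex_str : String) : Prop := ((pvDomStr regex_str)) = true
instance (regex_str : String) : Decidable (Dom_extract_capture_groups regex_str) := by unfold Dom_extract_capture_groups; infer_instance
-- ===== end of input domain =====

-- B replaces A's depth/capture_depth counter bookkeeping by a two-phase decomposition:
-- a lexical pass producing paren events, then a fold over them with an explicit stack of
-- open groups (objective: alternative; same cost, different structure).

-- ===== PORT A =====

-- inner `while i < len and regex_str[i] != ']'` loop of A's '[' branch; returns the exit index.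
-- fuel-guarded recursion (fuel = string length at every call site, always sufficient since i grows).
def aClassSkip (s : List Char) : Nat → Nat → Nat
  | 0, i => i
  | f + 1, i =>
    if h : i < s.length then
      if s[i] ≠ ']' then
        if s[i] = '\\' then aClassSkip s f (i + 2) else aClassSkip s f (i + 1)
      else i
    else i

-- A's main `while i < len(regex_str)` loop: state = (i, depth, group_start, capture_depth, groups).
def aLoop (s : List Char) : Nat → Nat → Int → Option Int → Option Int → List String → List String
  | 0, _, _, _, _, acc => acc
  | f + 1, i, d, gs, cd, acc =>
    if h : i < s.length then
      let ch := s[i]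
      if ch = '\\' then
        aLoop s f (i + 2) d gs cd acc
      else if ch = '[' then
        aLoop s f (aClassSkip s s.length (i + 1) + 1) d gs cd acc
      else if ch = '(' then
        if (decide (i + 1 < s.length) && decide (s.getD (i + 1) ' ' = '?')) = true then
          aLoop s f (i + 1) (d + 1) gs cd acc
        else
          match cd with
          | none => aLoop s f (i + 1) (d + 1) (some (i : Int)) (some (d + 1)) acc
          | some _ => aLoop s f (i + 1) (d + 1) gs cd acc
      else if ch = ')' then
        if (cd.isSome && decide (cd = some d)) = true then
          aLoop s f (i + 1) (d - 1) none none
            (acc ++ [String.ofList (PySem.List.slice s (some (gs.getD 0)) (some ((i : Int) + 1)))])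
        else
          aLoop s f (i + 1) (d - 1) gs cd acc
      else
        aLoop s f (i + 1) d gs cd acc
    else acc

def extract_capture_groups (regex_str : String) : List String :=
  aLoop regex_str.toList regex_str.toList.length 0 0 none none []

-- ===== PORT B =====

-- inner character-class skip of B's _events (same lexical rule as A's, B-side copy).
def bClassSkip (s : List Char) : Nat → Nat → Nat
  | 0, i => i
  | f + 1, i =>
    if h : i < s.length then
      if s[i] ≠ ']' then
        if s[i] = '\\' then bClassSkip s f (i + 2) else bClassSkip s f (i + 1)
      else i
    else i

-- B's _events while-loop: appends ('(', i, capturing) / (')', i, False) events.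
def bEvents (s : List Char) : Nat → Nat → List (Char × Int × Bool) → List (Char × Int × Bool)
  | 0, _, acc => acc
  | f + 1, i, acc =>
    if h : i < s.length then
      let ch := s[i]
      if ch = '\\' then
        bEvents s f (i + 2) acc
      else if ch = '[' then
        bEvents s f (bClassSkip s s.length (i + 1) + 1) acc
      else if ch = '(' then
        bEvents s f (i + 1)
          (acc ++ [('(', (i : Int), !(decide (i + 1 < s.length) && decide (s.getD (i + 1) ' ' = '?')))])
      else if ch = ')' then
        bEvents s f (i + 1) (acc ++ [(')', (i : Int), false)])
      else
        bEvents s f (i + 1) acc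
    else acc

-- B's for-loop over the events: explicit stack of open groups (head = top) + pending flag.
def bFold (s : List Char) : List (Char × Int × Bool) → List (Int × Bool) → Bool → List String → List String
  | [], _, _, acc => acc
  | (kind, idx, capturing) :: evs, st, pending, acc =>
    if kind = '(' then
      let isCap := capturing && !pending
      bFold s evs ((idx, isCap) :: st) (if isCap then true else pending) acc
    else
      match st with
      | [] => bFold s evs [] pending acc
      | (start, wasCap) :: rest =>
        if wasCap then
          bFold s evs rest false
            (acc ++ [String.ofList (PySem.List.slice s (some start) (some (idx + 1)))])
        else
          bFold s evs rest pending acc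

def extract_capture_groups_alt (regex_str : String) : List String :=
  bFold regex_str.toList (bEvents regex_str.toList regex_str.toList.length 0 []) [] false []

-- ===== PRECONDITION & SPEC =====
def Spec_extract_capture_groups (regex_str : String) (out : List String) : Prop := out = extract_capture_groups_alt regex_str
instance (regex_str : String) (out : List String) : Decidable (Spec_extract_capture_groups regex_str out) := by unfold Spec_extract_capture_groups; infer_instance

-- ===== CLAIM (what is proved, stated in full; the proofs are below) =====
def Claim_equal_extract_capture_groups : Prop := ∀ (regex_str : String), Dom_extract_capture_groups regex_str → Spec_extract_capture_groups regex_str (extract_capture_groups regex_str)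

-- ===== LEMMAS AND PROOFS =====

-- the two class-skip copies coincide
theorem classSkip_eq (s : List Char) : ∀ f i, bClassSkip s f i = aClassSkip s f i := by
  intro f
  induction f with
  | zero => intro i; rfl
  | succ f ih => intro i; simp only [bClassSkip, aClassSkip]; split <;> [skip; rfl]; split <;> [skip; rfl]; split <;> exact ih _

-- events accumulator peels off
theorem bEvents_acc (s : List Char) : ∀ f i acc, bEvents s f i acc = acc ++ bEvents s f i [] := by
  intro f
  induction f with
  | zero => intro i acc; simp [bEvents]
  | succ f ih =>
    intro i acc
    simp only [bEvents]
    split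
    · split
      · exact ih _ _
      · split
        · exact ih _ _
        · split
          · rw [ih ((i:Nat)+1) (acc ++ _), ih ((i:Nat)+1) ([] ++ _)]; simp
          · split
            · rw [ih ((i:Nat)+1) (acc ++ _), ih ((i:Nat)+1) ([] ++ _)]; simp
            · exact ih _ _
    · simp

-- interpreter of the event stream with A's counter state (proof-side bridge)
def interpA (s : List Char) : List (Char × Int × Bool) → Int → Option Int → Option Int → List String → List String
  | [], _, _, _, acc => acc
  | (kind, idx, capturing) :: evs, d, gs, cd, acc =>
    if kind = '(' then
      if capturing then
        match cd with
        | none => interpA s evs (d + 1) (some idx) (some (d + 1)) acc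
        | some _ => interpA s evs (d + 1) gs cd acc
      else interpA s evs (d + 1) gs cd acc
    else
      if (cd.isSome && decide (cd = some d)) = true then
        interpA s evs (d - 1) none none
          (acc ++ [String.ofList (PySem.List.slice s (some (gs.getD 0)) (some (idx + 1)))])
      else
        interpA s evs (d - 1) gs cd acc

-- A's loop equals the interpreter run on B's event stream (same fuel, same index)
theorem aLoop_eq_interp (s : List Char) :
    ∀ f i d gs cd acc, aLoop s f i d gs cd acc = interpA s (bEvents s f i []) d gs cd acc := by
  intro f
  induction f with
  | zero => intro i d gs cd acc; rfl
  | succ f ih =>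
    intro i d gs cd acc
    simp only [aLoop, bEvents]
    split
    · split
      · exact ih _ _ _ _ _
      · split
        · rw [classSkip_eq]; exact ih _ _ _ _ _
        · split
          · rw [bEvents_acc]
            simp only [List.nil_append, List.cons_append, interpA, reduceIte]
            by_cases hk : (decide (i + 1 < s.length) && decide (s.getD (i + 1) ' ' = '?')) = true
            · simp only [hk, Bool.not_true, if_neg (by simp : ¬ (false = true))]
              exact ih _ _ _ _ _
            · simp only [Bool.not_eq_true] at hk
              simp only [hk, Bool.not_false, if_neg (by simp : ¬ (false = true))]
              cases cd <;> exact ih _ _ _ _ _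
          · split
            · rw [bEvents_acc]
              simp only [List.nil_append, List.cons_append, interpA]
              by_cases hc : (cd.isSome && decide (cd = some d)) = true
              · simp only [hc]; exact ih _ _ _ _ _
              · simp only [Bool.not_eq_true] at hc
                simp only [hc, if_neg (by simp : ¬ (false = true))]
                exact ih _ _ _ _ _
            · exact ih _ _ _ _ _
    · rfl

-- the coupling invariant between A's counters and B's stack
def StInv (d : Int) (gs cd : Option Int) (st : List (Int × Bool)) (p : Bool) : Prop :=
  match cd with
  | none => p = false ∧ ∀ e ∈ st, e.2 = false
  | some c => p = true ∧ ∃ g up lo, gs = some g ∧ st = up ++ (g, true) :: lo ∧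
      (∀ e ∈ up, e.2 = false) ∧ (∀ e ∈ lo, e.2 = false) ∧ c ≤ d ∧ (up.length : Int) = d - c

-- under the invariant, the counter interpreter and the stack fold agree
theorem interp_eq_fold (s : List Char) :
    ∀ evs d gs cd st p acc, StInv d gs cd st p →
      interpA s evs d gs cd acc = bFold s evs st p acc := by
  intro evs
  induction evs with
  | nil => intro d gs cd st p acc _; rfl
  | cons ev evs ih =>
    intro d gs cd st p acc hInv
    obtain ⟨kind, idx, capturing⟩ := ev
    simp only [interpA, bFold]
    split
    · -- open paren
      rcases cd with _ | c
      · obtain ⟨hp, hall⟩ := hInv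
        subst hp
        rcases hcap : capturing with _ | _
        · simp only [Bool.false_and, if_neg (by simp : ¬ (false = true))]
          exact ih _ _ _ _ _ _ ⟨rfl, by intro e he; rcases List.mem_cons.mp he with rfl | h; exacts [rfl, hall e h]⟩
        · simp only [Bool.true_and, Bool.not_false]
          refine ih _ _ _ _ _ _ ⟨rfl, idx, [], st, rfl, rfl, by simp, hall, le_refl _, by simp⟩
      · obtain ⟨hp, g, up, lo, hgs, hst, hup, hlo, hcd, hlen⟩ := hInv
        subst hp hst
        have : (capturing && !true) = false := by simp
        rw [this]
        simp only [if_neg (by simp : ¬ (false = true))]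
        rcases hcap : capturing with _ | _ <;>
        · refine ih _ _ _ _ _ _ ⟨rfl, g, (idx, false) :: up, lo, hgs, rfl, ?_, hlo, by omega, by simp only [List.length_cons]; push_cast; omega⟩
          intro e he; rcases List.mem_cons.mp he with rfl | h; exacts [rfl, hup e h]
    · -- close paren
      rcases cd with _ | c
      · obtain ⟨hp, hall⟩ := hInv
        subst hp
        simp only [Option.isSome_none, Bool.false_and, if_neg (by simp : ¬ (false = true))]
        rcases st with _ | ⟨⟨st0, fl⟩, rest⟩
        · exact ih _ _ _ _ _ _ ⟨rfl, by simp⟩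
        · have hfl : fl = false := hall (st0, fl) (by simp)
          subst hfl
          simp only [if_neg (by simp : ¬ (false = true))]
          exact ih _ _ _ _ _ _ ⟨rfl, fun e he => hall e (by simp [he])⟩
      · obtain ⟨hp, g, up, lo, hgs, hst, hup, hlo, hcd, hlen⟩ := hInv
        subst hp hst hgs
        by_cases hd : c = d
        · subst hd
          have hup0 : up = [] := by
            have : up.length = 0 := by omega
            exact List.length_eq_zero_iff.mp this
          subst hup0
          simp only [List.nil_append, Option.isSome_some, Bool.true_and, decide_eq_true_eq,
            if_pos rfl, Option.getD_some]
          exact ih _ _ _ _ _ _ ⟨rfl, hlo⟩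
        · have hclt : c < d := lt_of_le_of_ne hcd hd
          have hup' : ∃ e up', up = e :: up' := by
            rcases up with _ | ⟨e, up'⟩
            · simp at hlen; omega
            · exact ⟨e, up', rfl⟩
          obtain ⟨⟨e1, e2⟩, up', rfl⟩ := hup'
          have he2 : e2 = false := hup (e1, e2) (by simp)
          subst he2
          simp only [Option.isSome_some, Bool.true_and, decide_eq_true_eq,
            List.cons_append, if_neg (by simp : ¬ (false = true))]
          rw [if_neg (show ¬ (some c : Option ℤ) = some d from fun h => hd (Option.some_injective _ h))]
          refine ih _ _ _ _ _ _ ?_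
          exact ⟨rfl, g, up', lo, rfl, rfl, fun e he => hup e (by simp [he]), hlo, by omega, by simp at hlen ⊢; omega⟩

-- ===== VERDICT (by name: the statement is the Claim_ definition above) =====
theorem extract_capture_groups_spec : Claim_equal_extract_capture_groups := by
  intro regex_str _
  show extract_capture_groups regex_str = extract_capture_groups_alt regex_str
  unfold extract_capture_groups extract_capture_groups_alt
  rw [aLoop_eq_interp]
  exact interp_eq_fold _ _ _ _ _ _ _ _ ⟨rfl, by simp⟩
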